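-- pv_equiv track=rewrite | github.com/pypi-data/pypi-mirror-174 | packages/human_math/human_math-0.1.tar.gz/human_math-0.1/human_math/parser/processors.py | get_parenthese_levels
-- ===== SOURCE A (Python) =====
-- from collections.abc import MutableSequence, Iterable
-- from itertools import chain
-- from typing import Optional
--
-- def get_parenthese_levels(opening_parentheses_indexes: Iterable[int],
--                           closing_parentheses_indexes: Iterable[int],
--                           tokens: Optional[Iterable[int]] = None) \
--         -> dict[int, int]:
--     if tokens is None:
--         tokens = chain(opening_parentheses_indexes, closing_parentheses_indexes)
--
--     tokens = list(tokens)
--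
--     levels = {}
--     nesting_level = 0
--     for p in sorted(set(chain(opening_parentheses_indexes, closing_parentheses_indexes, tokens))):
--         if p in closing_parentheses_indexes:
--             nesting_level -= 1
--
--         if p in tokens:
--             levels[p] = nesting_level
--
--         if p in opening_parentheses_indexes:
--             nesting_level += 1
--
--     return levels
-- ===== SOURCE B (Python) =====
-- def get_parenthese_levels(opening_parentheses_indexes, closing_parentheses_indexes, tokens=None):
--     opens = set(opening_parentheses_indexes)
--     closes = set(closing_parentheses_indexes)
--     if tokens is None:
--         toks = list(opening_parentheses_indexes) + list(closing_parentheses_indexes)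
--     else:
--         toks = list(tokens)
--     return {t: sum(1 for x in opens if x < t) - sum(1 for x in closes if x <= t)
--             for t in sorted(set(toks))}
-- ===== Notes on version B (the rewrite author's own statement) =====
-- stated objective: alternative
-- what changed: Replaces A's single sorted sweep over the union with running nesting state by a stateless per-token closed-form count: level(t) = #distinct openings < t minus #distinct closings <= t; only the tokens are sorted.
import Mathlib
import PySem

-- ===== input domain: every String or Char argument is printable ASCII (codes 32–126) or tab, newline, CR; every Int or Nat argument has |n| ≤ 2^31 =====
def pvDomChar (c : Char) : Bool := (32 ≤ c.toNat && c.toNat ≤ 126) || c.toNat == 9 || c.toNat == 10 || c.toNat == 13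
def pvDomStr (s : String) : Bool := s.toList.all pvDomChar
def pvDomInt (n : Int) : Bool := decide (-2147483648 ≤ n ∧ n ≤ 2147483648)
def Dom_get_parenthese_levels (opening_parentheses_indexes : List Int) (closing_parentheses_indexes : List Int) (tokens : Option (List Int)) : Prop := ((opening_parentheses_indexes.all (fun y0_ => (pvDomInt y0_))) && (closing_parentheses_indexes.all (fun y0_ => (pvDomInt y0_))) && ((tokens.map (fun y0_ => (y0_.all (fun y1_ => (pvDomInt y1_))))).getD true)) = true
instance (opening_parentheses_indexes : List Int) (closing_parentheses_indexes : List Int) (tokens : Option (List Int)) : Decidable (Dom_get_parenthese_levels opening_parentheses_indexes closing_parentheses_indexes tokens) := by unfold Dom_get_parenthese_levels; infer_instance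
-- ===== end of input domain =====

-- B replaces A's stateful sorted sweep by a stateless per-token closed-form count (alternative decomposition, similar cost).

-- ===== PORT A =====
def get_parenthese_levels (opening_parentheses_indexes : List Int) (closing_parentheses_indexes : List Int) (tokens : Option (List Int)) : List (Int × Int) :=
  let toks : List Int := match tokens with
    | none => opening_parentheses_indexes ++ closing_parentheses_indexes
    | some ts => ts
  let ps : List Int :=
    PySem.List.sorted (PySem.Set.ofList (opening_parentheses_indexes ++ closing_parentheses_indexes ++ toks)) (fun x => x) false
  (ps.foldl (fun (st : PySem.Dict Int Int × Int) p =>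
      let n1 : Int := if p ∈ closing_parentheses_indexes then st.2 - 1 else st.2
      let d1 : PySem.Dict Int Int := if p ∈ toks then st.1.insert p n1 else st.1
      let n2 : Int := if p ∈ opening_parentheses_indexes then n1 + 1 else n1
      (d1, n2)) (PySem.Dict.empty, 0)).1.items

-- ===== PORT B =====
def get_parenthese_levels_alt (opening_parentheses_indexes : List Int) (closing_parentheses_indexes : List Int) (tokens : Option (List Int)) : List (Int × Int) :=
  let opens : PySem.Set Int := PySem.Set.ofList opening_parentheses_indexes
  let closes : PySem.Set Int := PySem.Set.ofList closing_parentheses_indexes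
  let toks : List Int := match tokens with
    | none => opening_parentheses_indexes ++ closing_parentheses_indexes
    | some ts => ts
  (PySem.List.sorted (PySem.Set.ofList toks) (fun x => x) false).map
    (fun t => (t, (opens.countP (fun x => decide (x < t)) : Int) - (closes.countP (fun x => decide (x ≤ t)) : Int)))

-- ===== PRECONDITION & SPEC =====
def Spec_get_parenthese_levels (opening_parentheses_indexes : List Int) (closing_parentheses_indexes : List Int) (tokens : Option (List Int)) (out : List (Int × Int)) : Prop := out = get_parenthese_levels_alt opening_parentheses_indexes closing_parentheses_indexes tokens
instance (opening_parentheses_indexes : List Int) (closing_parentheses_indexes : List Int) (tokens : Option (List Int)) (out : List (Int × Int)) : Decidable (Spec_get_parenthese_levels opening_parentheses_indexes closing_parentheses_indexes tokens out) := by unfold Spec_get_parenthese_levels; infer_instance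

-- ===== CLAIM (what is proved, stated in full; the proofs are below) =====
def Claim_equal_get_parenthese_levels : Prop := ∀ (opening_parentheses_indexes : List Int) (closing_parentheses_indexes : List Int) (tokens : Option (List Int)), Dom_get_parenthese_levels opening_parentheses_indexes closing_parentheses_indexes tokens → Spec_get_parenthese_levels opening_parentheses_indexes closing_parentheses_indexes tokens (get_parenthese_levels opening_parentheses_indexes closing_parentheses_indexes tokens)

-- ===== LEMMAS AND PROOFS =====

-- countP (· ≤ p) splits into countP (· < p) plus the multiplicity of p.
theorem pv_countP_le_split (l : List Int) (p : Int) :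
    l.countP (fun x => decide (x ≤ p)) = l.countP (fun x => decide (x < p)) + l.count p := by
  induction l with
  | nil => simp
  | cons a t ih =>
    simp only [List.countP_cons, List.count_cons, ih]
    by_cases h1 : a ≤ p <;> by_cases h2 : a < p <;> by_cases h3 : a = p <;>
      simp [h1, h2, h3] <;> omega

-- count of a member in a nodup list is 1.
theorem pv_count_nodup (l : List Int) (p : Int) (hnd : l.Nodup) :
    l.count p = (if p ∈ l then 1 else 0) := by
  by_cases h : p ∈ l
  · simp [h, List.count_eq_one_of_mem hnd h]
  · simp [h, List.count_eq_zero.mpr h]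

-- The main loop invariant for A's sweep: membership tests run over the raw lists co/cc,
-- the counts over their deduplications opens/closes.
theorem pv_loop (co cc toks opens closes : List Int) (f : Int → Int)
    (hmo : ∀ x : Int, x ∈ opens ↔ x ∈ co) (hmc : ∀ x : Int, x ∈ closes ↔ x ∈ cc)
    (hf : ∀ t, f t = ((opens.countP (fun x => decide (x < t)) : Int) - (closes.countP (fun x => decide (x ≤ t)) : Int)))
    (hno : opens.Nodup) (hnc : closes.Nodup) :
    ∀ (ps : List Int) (d : PySem.Dict Int Int) (n : Int),
    ps.Pairwise (· < ·) →
    (∀ x ∈ opens, x ∈ ps ∨ (∀ q ∈ ps, x < q)) →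
    (∀ x ∈ closes, x ∈ ps ∨ (∀ q ∈ ps, x < q)) →
    (∀ q ∈ ps, d.contains q = false) →
    n = ((opens.countP (fun x => decide (∀ q ∈ ps, x < q)) : Int) - (closes.countP (fun x => decide (∀ q ∈ ps, x < q)) : Int)) →
    (ps.foldl (fun (st : PySem.Dict Int Int × Int) p =>
      let n1 : Int := if p ∈ cc then st.2 - 1 else st.2
      let d1 : PySem.Dict Int Int := if p ∈ toks then st.1.insert p n1 else st.1
      let n2 : Int := if p ∈ co then n1 + 1 else n1
      (d1, n2)) (d, n)).1.items
    = d.items ++ (ps.filter (fun p => decide (p ∈ toks))).map (fun t => (t, f t)) := by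
  intro ps
  induction ps with
  | nil => intro d n _ _ _ _ _; simp
  | cons p rest ih =>
    intro d n hpw ho hc hd hn
    have hpwrest : rest.Pairwise (· < ·) := hpw.of_cons
    have hplt : ∀ q ∈ rest, p < q := by
      intro q hq; exact (List.pairwise_cons.mp hpw).1 q hq
    -- for x in opens (resp. closes): "below all of p::rest" ↔ x < p,
    -- and "below all of rest" ↔ x ≤ p
    have hlow : ∀ x : Int, (x ∈ opens ∨ x ∈ closes) →
        ((∀ q ∈ p :: rest, x < q) ↔ x < p) := by
      intro x _; constructor
      · intro h; exact h p (List.mem_cons_self ..)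
      · intro h q hq
        rcases List.mem_cons.mp hq with rfl | hq'
        · exact h
        · exact lt_trans h (hplt q hq')
    have hlow' : ∀ x : Int, (x ∈ opens ∨ x ∈ closes) →
        ((∀ q ∈ rest, x < q) ↔ x ≤ p) := by
      intro x hx; constructor
      · intro h
        by_contra hgt
        push Not at hgt
        have hmem : x ∈ p :: rest ∨ (∀ q ∈ p :: rest, x < q) := by
          rcases hx with hx | hx
          · exact ho x hx
          · exact hc x hx
        rcases hmem with hm | hm
        · rcases List.mem_cons.mp hm with rfl | hm'
          · exact absurd hgt (lt_irrefl _)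
          · exact absurd (h x hm') (lt_irrefl x)
        · exact absurd (hm p (List.mem_cons_self ..)) (not_lt.mpr (le_of_lt hgt))
      · intro h q hq; exact lt_of_le_of_lt h (hplt q hq)
    have hcO : opens.countP (fun x => decide (∀ q ∈ p :: rest, x < q)) = opens.countP (fun x => decide (x < p)) := by
      apply List.countP_congr; intro x hx
      simp only [decide_eq_true_eq]
      exact hlow x (Or.inl hx)
    have hcC : closes.countP (fun x => decide (∀ q ∈ p :: rest, x < q)) = closes.countP (fun x => decide (x < p)) := by
      apply List.countP_congr; intro x hx
      simp only [decide_eq_true_eq]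
      exact hlow x (Or.inr hx)
    have hcO' : opens.countP (fun x => decide (∀ q ∈ rest, x < q)) = opens.countP (fun x => decide (x ≤ p)) := by
      apply List.countP_congr; intro x hx
      simp only [decide_eq_true_eq]
      exact hlow' x (Or.inl hx)
    have hcC' : closes.countP (fun x => decide (∀ q ∈ rest, x < q)) = closes.countP (fun x => decide (x ≤ p)) := by
      apply List.countP_congr; intro x hx
      simp only [decide_eq_true_eq]
      exact hlow' x (Or.inr hx)
    -- values of the updated state
    have hsplitO := pv_countP_le_split opens p
    have hsplitC := pv_countP_le_split closes p
    have hcntO := pv_count_nodup opens p hno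
    have hcntC := pv_count_nodup closes p hnc
    simp only [List.foldl_cons]
    set n1 : Int := if p ∈ cc then n - 1 else n with hn1
    set d1 : PySem.Dict Int Int := if p ∈ toks then d.insert p n1 else d with hd1
    set n2 : Int := if p ∈ co then n1 + 1 else n1 with hn2
    have hn1v : n1 = ((opens.countP (fun x => decide (x < p)) : Int) - (closes.countP (fun x => decide (x ≤ p)) : Int)) := by
      rw [hn1, hn, hcO, hcC]
      by_cases hpc : p ∈ cc
      · have hpc' : p ∈ closes := (hmc p).mpr hpc
        simp [hpc, hpc'] at hcntC ⊢
        omega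
      · have hpc' : p ∉ closes := fun h => hpc ((hmc p).mp h)
        simp [hpc, hpc'] at hcntC ⊢
        omega
    have hn2v : n2 = ((opens.countP (fun x => decide (∀ q ∈ rest, x < q)) : Int) - (closes.countP (fun x => decide (∀ q ∈ rest, x < q)) : Int)) := by
      rw [hn2, hn1v, hcO', hcC', hsplitO]
      by_cases hpo : p ∈ co
      · have hpo' : p ∈ opens := (hmo p).mpr hpo
        simp [hpo, hpo'] at hcntO ⊢
        omega
      · have hpo' : p ∉ opens := fun h => hpo ((hmo p).mp h)
        simp [hpo, hpo'] at hcntO ⊢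
        omega
    have hd1c : ∀ q ∈ rest, d1.contains q = false := by
      intro q hq
      have hne : q ≠ p := ne_of_gt (hplt q hq)
      rw [hd1]
      by_cases hpt : p ∈ toks
      · simp [hpt, PySem.Dict.contains_insert, hd q (List.mem_cons_of_mem _ hq), hne]
      · simp [hpt, hd q (List.mem_cons_of_mem _ hq)]
    have ho' : ∀ x ∈ opens, x ∈ rest ∨ (∀ q ∈ rest, x < q) := by
      intro x hx
      rcases ho x hx with hm | hm
      · rcases List.mem_cons.mp hm with rfl | hm'
        · exact Or.inr (fun q hq => hplt q hq)
        · exact Or.inl hm'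
      · exact Or.inr (fun q hq => hm q (List.mem_cons_of_mem _ hq))
    have hc' : ∀ x ∈ closes, x ∈ rest ∨ (∀ q ∈ rest, x < q) := by
      intro x hx
      rcases hc x hx with hm | hm
      · rcases List.mem_cons.mp hm with rfl | hm'
        · exact Or.inr (fun q hq => hplt q hq)
        · exact Or.inl hm'
      · exact Or.inr (fun q hq => hm q (List.mem_cons_of_mem _ hq))
    have hrec := ih d1 n2 hpwrest ho' hc' hd1c hn2v
    rw [hrec]
    by_cases hpt : p ∈ toks
    · have hitems : d1.items = d.items ++ [(p, n1)] := by
        rw [hd1]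
        simp [hpt, PySem.Dict.items_insert_of_not_contains d n1 (hd p (List.mem_cons_self ..))]
      rw [hitems]
      simp [hpt, hf p, hn1v]
    · have hitems : d1.items = d.items := by rw [hd1]; simp [hpt]
      rw [hitems]
      simp [hpt]

-- A's sweep equals B's per-token formula, for an arbitrary already-materialised token list.
theorem pv_main (o c toks : List Int) :
    ((PySem.List.sorted (PySem.Set.ofList (o ++ c ++ toks)) (fun x => x) false).foldl
      (fun (st : PySem.Dict Int Int × Int) p =>
        let n1 : Int := if p ∈ c then st.2 - 1 else st.2
        let d1 : PySem.Dict Int Int := if p ∈ toks then st.1.insert p n1 else st.1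
        let n2 : Int := if p ∈ o then n1 + 1 else n1
        (d1, n2)) (PySem.Dict.empty, 0)).1.items
    = (PySem.List.sorted (PySem.Set.ofList toks) (fun x => x) false).map
        (fun t => (t, ((PySem.Set.ofList o).countP (fun x => decide (x < t)) : Int) - ((PySem.Set.ofList c).countP (fun x => decide (x ≤ t)) : Int))) := by
  have hpw : (PySem.List.sorted (PySem.Set.ofList (o ++ c ++ toks)) (fun x => x) false).Pairwise (· < ·) :=
    PySem.List.sorted_ofList_pairwise_lt (o ++ c ++ toks)
  have hmemps : ∀ x : Int, x ∈ PySem.List.sorted (PySem.Set.ofList (o ++ c ++ toks)) (fun x => x) false ↔ (x ∈ o ∨ x ∈ c ∨ x ∈ toks) := by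
    intro x
    rw [PySem.List.mem_sorted, PySem.Set.mem_ofList]
    simp
  have hloop := pv_loop o c toks (PySem.Set.ofList o) (PySem.Set.ofList c)
    (fun t => ((PySem.Set.ofList o).countP (fun x => decide (x < t)) : Int) - ((PySem.Set.ofList c).countP (fun x => decide (x ≤ t)) : Int))
    (fun x => PySem.Set.mem_ofList o x) (fun x => PySem.Set.mem_ofList c x)
    (fun t => rfl)
    (PySem.Set.nodup_ofList o) (PySem.Set.nodup_ofList c)
    (PySem.List.sorted (PySem.Set.ofList (o ++ c ++ toks)) (fun x => x) false)
    PySem.Dict.empty 0 hpw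
    (by intro x hx
        exact Or.inl ((hmemps x).mpr (Or.inl ((PySem.Set.mem_ofList o x).mp hx))))
    (by intro x hx
        exact Or.inl ((hmemps x).mpr (Or.inr (Or.inl ((PySem.Set.mem_ofList c x).mp hx)))))
    (by intro q _; rfl)
    (by
      have h1 : (PySem.Set.ofList o).countP (fun x => decide (∀ q ∈ PySem.List.sorted (PySem.Set.ofList (o ++ c ++ toks)) (fun x => x) false, x < q)) = 0 := by
        rw [List.countP_eq_zero]
        intro x hx
        simp only [decide_eq_true_eq]
        intro h
        have hxps := (hmemps x).mpr (Or.inl ((PySem.Set.mem_ofList o x).mp hx))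
        exact absurd (h x hxps) (lt_irrefl x)
      have h2 : (PySem.Set.ofList c).countP (fun x => decide (∀ q ∈ PySem.List.sorted (PySem.Set.ofList (o ++ c ++ toks)) (fun x => x) false, x < q)) = 0 := by
        rw [List.countP_eq_zero]
        intro x hx
        simp only [decide_eq_true_eq]
        intro h
        have hxps := (hmemps x).mpr (Or.inr (Or.inl ((PySem.Set.mem_ofList c x).mp hx)))
        exact absurd (h x hxps) (lt_irrefl x)
      rw [h1, h2]; simp)
  rw [hloop]
  have hfilter : (PySem.List.sorted (PySem.Set.ofList (o ++ c ++ toks)) (fun x => x) false).filter (fun p => decide (p ∈ toks))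
      = PySem.List.sorted (PySem.Set.ofList toks) (fun x => x) false := by
    symm
    apply PySem.List.sorted_eq_of_perm_of_pairwise_lt
    · apply (List.perm_ext_iff_of_nodup (List.Nodup.filter _ hpw.nodup) (PySem.Set.nodup_ofList toks)).mpr
      intro a
      rw [List.mem_filter, PySem.Set.mem_ofList, hmemps]
      simp only [decide_eq_true_eq]
      constructor
      · rintro ⟨_, h⟩; exact h
      · intro h; exact ⟨Or.inr (Or.inr h), h⟩
    · exact List.Pairwise.filter _ hpw
  rw [hfilter]
  simp [PySem.Dict.empty]

-- ===== VERDICT (by name: the statement is the Claim_ definition above) =====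
theorem get_parenthese_levels_spec : Claim_equal_get_parenthese_levels := by
  unfold Claim_equal_get_parenthese_levels
  intro o c t _
  unfold Spec_get_parenthese_levels get_parenthese_levels get_parenthese_levels_alt
  cases t with
  | none => exact pv_main o c (o ++ c)
  | some ts => exact pv_main o c ts
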